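-- pv_equiv track=rewrite | github.com/alanbarr/FinalYearProject | http_server/i2c_led_matrix_8.py | pattern_to_byte
-- ===== SOURCE A (Python) =====
-- def pattern_to_byte(pattern):
--     index = 0
--     byte = 0
--     for bit in pattern:
--         if bit == "1":
--             byte += 0x1<<index
--         index += 1
--     return byte
-- ===== SOURCE B (Python) =====
-- def pattern_to_byte(pattern):
--     byte = 0
--     for bit in reversed(pattern):
--         byte = byte * 2 + (1 if bit == "1" else 0)
--     return byte
-- ===== Notes on version B (the rewrite author's own statement) =====
-- stated objective: alternative
-- what changed: Replaces the index-tracked bit-shift accumulation (byte += 1<<index) with Horner's method over the reversed string (byte = byte*2 + bit), eliminating the index counter and traversing in the opposite order.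
import Mathlib
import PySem

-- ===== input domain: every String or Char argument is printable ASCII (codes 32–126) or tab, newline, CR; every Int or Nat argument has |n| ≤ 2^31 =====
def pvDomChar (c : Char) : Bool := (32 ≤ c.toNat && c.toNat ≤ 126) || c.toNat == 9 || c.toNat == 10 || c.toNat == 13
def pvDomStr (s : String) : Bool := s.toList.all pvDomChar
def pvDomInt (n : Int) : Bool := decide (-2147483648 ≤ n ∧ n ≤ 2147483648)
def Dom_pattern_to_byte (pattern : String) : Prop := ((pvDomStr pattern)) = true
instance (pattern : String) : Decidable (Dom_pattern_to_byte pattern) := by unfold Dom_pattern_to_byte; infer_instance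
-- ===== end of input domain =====

-- B replaces A's index-tracked bit-shift accumulation with Horner's method over the
-- reversed string (alternative decomposition; same behaviour on every input).

-- ===== PORT A =====
-- state = (index, byte); 0x1 << index ported as 2 ^ index (index is the loop counter, always ≥ 0)
def pattern_to_byte (pattern : String) : Int :=
  (pattern.toList.foldl
    (fun (s : Nat × Int) bit =>
      (s.1 + 1, if bit = '1' then s.2 + 2 ^ s.1 else s.2))
    (0, 0)).2

-- ===== PORT B =====
def pattern_to_byte_alt (pattern : String) : Int :=
  pattern.toList.reverse.foldl
    (fun byte bit => byte * 2 + (if bit = '1' then 1 else 0)) 0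

-- ===== PRECONDITION & SPEC =====
def Spec_pattern_to_byte (pattern : String) (out : Int) : Prop := out = pattern_to_byte_alt pattern
instance (pattern : String) (out : Int) : Decidable (Spec_pattern_to_byte pattern out) := by unfold Spec_pattern_to_byte; infer_instance

-- ===== CLAIM (what is proved, stated in full; the proofs are below) =====
def Claim_equal_pattern_to_byte : Prop := ∀ (pattern : String), Dom_pattern_to_byte pattern → Spec_pattern_to_byte pattern (pattern_to_byte pattern)

-- ===== LEMMAS AND PROOFS =====

-- LSB-first value of a bit list
def pvVal (l : List Char) : Int :=
  l.foldr (fun c a => 2 * a + (if c = '1' then 1 else 0)) 0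

theorem pvA_fold (l : List Char) : ∀ (i : Nat) (b : Int),
    (l.foldl (fun (s : Nat × Int) bit =>
      (s.1 + 1, if bit = '1' then s.2 + 2 ^ s.1 else s.2)) (i, b)).2
      = b + 2 ^ i * pvVal l := by
  induction l with
  | nil => intro i b; simp [pvVal]
  | cons h t ih =>
    intro i b
    simp only [List.foldl_cons, pvVal, List.foldr_cons]
    rw [ih]
    by_cases hc : h = '1' <;> simp [hc, pvVal, pow_succ] <;> ring

theorem pvB_eq (pattern : String) : pattern_to_byte_alt pattern = pvVal pattern.toList := by
  unfold pattern_to_byte_alt pvVal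
  rw [List.foldl_reverse]
  congr 1; funext c a; ring

-- ===== VERDICT (by name: the statement is the Claim_ definition above) =====
theorem pattern_to_byte_spec : Claim_equal_pattern_to_byte := by
  intro pattern _
  unfold Spec_pattern_to_byte
  rw [pvB_eq]
  unfold pattern_to_byte
  rw [pvA_fold]
  simp
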